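-- pv_equiv track=rewrite | github.com/MateusDeFreitasRosa/MachineLearning | RedeNeural_tic_tac_toe/TicTacToeCreateData.py | contColLines
-- ===== SOURCE A (Python) =====
-- def contColLines(tab,what,pos,player):
--     cont = 0
--     block = False
--
--     contraPlayer = 'x' if player == 'o' else 'o'
--
--     if (what == 'lines'):
--         for i in range(3):
--             if tab[pos][i] == player:
--                 cont+=1
--             elif tab[pos][i] == contraPlayer:
--                 block = True
--
--     elif (what == 'cols'):
--         for i in range(3):
--             if tab[i][pos] == player:
--                 cont+=1
--             elif tab[i][pos] == contraPlayer:
--                 block = True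
--
--     return cont if block == False else 0
-- ===== SOURCE B (Python) =====
-- def contColLines(tab, what, pos, player):
--     if what == 'lines':
--         cells = tab[pos][:3]
--     elif what == 'cols':
--         cells = [tab[i][pos] for i in range(3)]
--     else:
--         cells = []
--     freq = {}
--     for cell in cells:
--         freq[cell] = freq.get(cell, 0) + 1
--     contraPlayer = 'x' if player == 'o' else 'o'
--     return 0 if freq.get(contraPlayer, 0) else freq.get(player, 0)
-- ===== Notes on version B (the rewrite author's own statement) =====
-- stated objective: alternative
-- what changed: B extracts the target 3-cell line, builds a frequency dictionary (histogram) of its symbols once, and answers with two O(1) lookups (0 if the opponent's frequency is nonzero, else the player's frequency), replacing A's fused scan with a cont counter and a block flag.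
import Mathlib
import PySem

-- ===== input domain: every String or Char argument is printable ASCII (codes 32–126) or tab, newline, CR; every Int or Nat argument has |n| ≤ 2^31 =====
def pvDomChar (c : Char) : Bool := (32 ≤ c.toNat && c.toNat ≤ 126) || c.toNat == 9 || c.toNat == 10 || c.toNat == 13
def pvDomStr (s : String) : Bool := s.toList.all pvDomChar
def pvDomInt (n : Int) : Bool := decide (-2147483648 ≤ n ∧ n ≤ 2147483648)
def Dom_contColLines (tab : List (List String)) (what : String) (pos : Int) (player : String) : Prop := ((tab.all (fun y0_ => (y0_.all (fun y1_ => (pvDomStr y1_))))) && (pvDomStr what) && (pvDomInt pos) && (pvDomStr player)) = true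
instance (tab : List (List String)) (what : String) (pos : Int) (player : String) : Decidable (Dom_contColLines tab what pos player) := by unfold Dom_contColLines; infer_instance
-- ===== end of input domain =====

-- B extracts the target 3-cell line, builds a frequency dictionary of its symbols once,
-- and answers with two dictionary lookups, replacing A's fused cont/block scan (objective: alternative).

-- ===== PORT A =====
def contColLines (tab : List (List String)) (what : String) (pos : Int) (player : String) : Int :=
  let cont : Int := 0
  let block : Bool := false
  let contraPlayer : String := if player == "o" then "x" else "o"
  let (cont, block) :=
    if what == "lines" then
      (PySem.List.pyRange 0 3 1).foldl (fun (s : Int × Bool) i =>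
        if PySem.List.pyGetD (PySem.List.pyGetD tab pos []) i "" == player then (s.1 + 1, s.2)
        else if PySem.List.pyGetD (PySem.List.pyGetD tab pos []) i "" == contraPlayer then (s.1, true)
        else s) (cont, block)
    else if what == "cols" then
      (PySem.List.pyRange 0 3 1).foldl (fun (s : Int × Bool) i =>
        if PySem.List.pyGetD (PySem.List.pyGetD tab i []) pos "" == player then (s.1 + 1, s.2)
        else if PySem.List.pyGetD (PySem.List.pyGetD tab i []) pos "" == contraPlayer then (s.1, true)
        else s) (cont, block)
    else (cont, block)
  if block == false then cont else 0

-- ===== PORT B =====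
def contColLines_alt (tab : List (List String)) (what : String) (pos : Int) (player : String) : Int :=
  let cells : List String :=
    if what == "lines" then
      PySem.List.slice (PySem.List.pyGetD tab pos []) none (some 3)
    else if what == "cols" then
      (PySem.List.pyRange 0 3 1).map (fun i => PySem.List.pyGetD (PySem.List.pyGetD tab i []) pos "")
    else []
  let freq : PySem.Dict String Int :=
    cells.foldl (fun d c => d.insert c (d.getD c 0 + 1)) PySem.Dict.empty
  let contraPlayer : String := if player == "o" then "x" else "o"
  if freq.getD contraPlayer 0 ≠ 0 then 0 else freq.getD player 0

-- ===== PRECONDITION & SPEC =====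
-- Pre_ excludes exactly the inputs on which A raises IndexError: for 'lines', pos must index tab
-- and that row must have at least 3 cells; for 'cols', tab must have at least 3 rows and pos must
-- index each of the first 3 rows.
def Pre_contColLines (tab : List (List String)) (what : String) (pos : Int) (player : String) : Prop :=
  (what = "lines" → PySem.Raise.InRange tab.length pos ∧ 3 ≤ (PySem.List.pyGetD tab pos []).length) ∧
  (what = "cols" → 3 ≤ tab.length ∧
    PySem.Raise.InRange (PySem.List.pyGetD tab 0 []).length pos ∧
    PySem.Raise.InRange (PySem.List.pyGetD tab 1 []).length pos ∧
    PySem.Raise.InRange (PySem.List.pyGetD tab 2 []).length pos)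
instance (tab : List (List String)) (what : String) (pos : Int) (player : String) : Decidable (Pre_contColLines tab what pos player) := by unfold Pre_contColLines; infer_instance

def pvWitness_contColLines : List (List String) × String × Int × String :=
  ([["x", "o", ""], ["o", "x", "x"], ["", "", "o"]], "cols", 1, "x")

def Spec_contColLines (tab : List (List String)) (what : String) (pos : Int) (player : String) (out : Int) : Prop := out = contColLines_alt tab what pos player
instance (tab : List (List String)) (what : String) (pos : Int) (player : String) (out : Int) : Decidable (Spec_contColLines tab what pos player out) := by unfold Spec_contColLines; infer_instance

-- ===== CLAIM (what is proved, stated in full; the proofs are below) =====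
def Claim_equal_contColLines : Prop := ∀ (tab : List (List String)) (what : String) (pos : Int) (player : String), Dom_contColLines tab what pos player → Pre_contColLines tab what pos player → Spec_contColLines tab what pos player (contColLines tab what pos player)

-- ===== LEMMAS AND PROOFS =====

-- A list of length ≥ 3 starts with three cells.
theorem pv_three_cons (l : List String) (h : 3 ≤ l.length) :
    ∃ a b c r, l = a :: b :: c :: r := by
  match l with
  | a :: b :: c :: r => exact ⟨a, b, c, r, rfl⟩
  | [] | [_] | [_, _] => simp at h

-- A's fused cont/block loop, characterised: with player ≠ contra it accumulates the
-- player count and ORs in whether the opponent occurs.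
theorem foldA_char (player contra : String) (hne : player ≠ contra) (l : List String) :
    ∀ (c : Int) (b : Bool),
      l.foldl (fun (s : Int × Bool) x =>
        if x == player then (s.1 + 1, s.2)
        else if x == contra then (s.1, true)
        else s) (c, b) = (c + (l.count player : Int), b || l.contains contra) := by
  induction l with
  | nil => intro c b; simp
  | cons x xs ih =>
    intro c b
    rw [List.foldl_cons]
    by_cases h1 : x = player
    · rw [if_pos (by simp [h1])]
      rw [ih]
      have h2 : ¬ contra = player := fun h => hne h.symm
      simp [h1, h2, List.count_cons]
      omega
    · by_cases h2 : x = contra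
      · rw [if_neg (by simp [h1]), if_pos (by simp [h2])]
        rw [ih]
        have h3 : ¬ contra = player := fun h => hne h.symm
        simp [h1, h2, h3, List.count_cons]
      · rw [if_neg (by simp [h1]), if_neg (by simp [h2])]
        rw [ih]
        have h3 : ¬ contra = x := fun h => h2 h.symm
        simp [h1, h3, List.count_cons]

-- B's histogram lookups, characterised: the frequency dictionary built over the cells
-- returns each symbol's occurrence count.
theorem freq_getD (cells : List String) (v : String) :
    (cells.foldl (fun (d : PySem.Dict String Int) c => d.insert c (d.getD c 0 + 1))
        PySem.Dict.empty).getD v 0 = (cells.count v : Int) := by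
  rw [PySem.Dict.getD_foldl_insert_add_one]
  simp

-- The common decision step: A's (count, blocked) pair and B's two histogram lookups agree.
theorem decide_agree (cells : List String) (player contra : String) :
    (if (((0 + (cells.count player : Int), false || cells.contains contra).2 == false) = true)
      then (0 + (cells.count player : Int), false || cells.contains contra).1 else 0) =
    (if (cells.count contra : Int) ≠ 0 then 0 else (cells.count player : Int)) := by
  by_cases h : contra ∈ cells
  · have h1 : cells.contains contra = true := by simpa using h
    have h2 : cells.count contra ≠ 0 := by simpa [List.count_eq_zero] using h
    simp [h1, h2]
    exact fun hx => absurd h hx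
  · have h1 : cells.contains contra = false := by simpa using h
    have h2 : cells.count contra = 0 := by simpa [List.count_eq_zero] using h
    simp [h2]
    exact fun hx => absurd hx h

theorem contColLines_spec_aux (tab : List (List String)) (what : String) (pos : Int) (player : String)
    (hpre : Pre_contColLines tab what pos player) :
    contColLines tab what pos player = contColLines_alt tab what pos player := by
  obtain ⟨hl, hc⟩ := hpre
  have hne : player ≠ (if player == "o" then "x" else "o") := by
    by_cases h : player = "o" <;> simp [h]
  have hrng : PySem.List.pyRange 0 3 1 = [0, 1, 2] := by decide
  simp only [contColLines, contColLines_alt]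
  rw [freq_getD, freq_getD]
  by_cases hwl : what = "lines"
  · obtain ⟨-, hlen⟩ := hl hwl
    obtain ⟨a, b, c, r, hrow⟩ := pv_three_cons _ hlen
    have hsl : PySem.List.slice (a :: b :: c :: r) none (some 3) = [a, b, c] := by
      simpa using PySem.List.slice_to_natCast (a :: b :: c :: r) 3
    have hget0 : PySem.List.pyGetD (a :: b :: c :: r) (0 : Int) "" = a := by
      simpa using PySem.List.pyGetD_natCast (a :: b :: c :: r) 0 ""
    have hget1 : PySem.List.pyGetD (a :: b :: c :: r) (1 : Int) "" = b := by
      simpa using PySem.List.pyGetD_natCast (a :: b :: c :: r) 1 ""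
    have hget2 : PySem.List.pyGetD (a :: b :: c :: r) (2 : Int) "" = c := by
      simpa using PySem.List.pyGetD_natCast (a :: b :: c :: r) 2 ""
    have hkey := foldA_char player (if player == "o" then "x" else "o") hne [a, b, c] 0 false
    simp only [List.foldl_cons, List.foldl_nil] at hkey
    simp only [hwl, hrow, hsl, hrng, beq_self_eq_true, if_true,
      List.foldl_cons, List.foldl_nil, hget0, hget1, hget2]
    rw [hkey]
    exact decide_agree [a, b, c] player (if player == "o" then "x" else "o")
  · by_cases hwc : what = "cols"
    · have hwlb : (what == "lines") = false := by simp [hwl]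
      have hkey := foldA_char player (if player == "o" then "x" else "o") hne
        [PySem.List.pyGetD (PySem.List.pyGetD tab (0 : Int) []) pos "",
         PySem.List.pyGetD (PySem.List.pyGetD tab (1 : Int) []) pos "",
         PySem.List.pyGetD (PySem.List.pyGetD tab (2 : Int) []) pos ""] 0 false
      simp only [List.foldl_cons, List.foldl_nil] at hkey
      simp only [hwlb, Bool.false_eq_true, if_false, hwc, beq_self_eq_true, if_true, hrng,
        List.foldl_cons, List.foldl_nil, List.map_cons, List.map_nil]
      rw [hkey]
      exact decide_agree _ player (if player == "o" then "x" else "o")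
    · have hwlb : (what == "lines") = false := by simp [hwl]
      have hwcb : (what == "cols") = false := by simp [hwc]
      simp [hwlb, hwcb]

-- ===== VERDICT (by name: the statement is the Claim_ definition above) =====
theorem contColLines_spec : Claim_equal_contColLines := by
  intro tab what pos player _ hpre
  exact contColLines_spec_aux tab what pos player hpre
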